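-- pv_equiv track=rewrite | github.com/CZ-NIC/knot | scripts/redis_unalias.py | dname_to_str
-- ===== SOURCE A (Python) =====
-- def dname_to_str(wire):
--     res = ""
--
--     dname_len = len(wire)
--     if dname_len == 0:
--         return res
--
--     label_len = 0
--     for i in range(0, dname_len):
--         if label_len == 0:
--             label_len = wire[i]
--             if len(res) > 0 or dname_len == 1:
--                 res += '.'
--             continue
--
--         c = chr(wire[i])
--         if c.isalnum() or c == '-':
--             res += c
--         else:
--             res += f"\\{wire[i]:03}"
--
--         label_len -= 1
--
--     return res
-- ===== SOURCE B (Python) =====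
-- def _encode_byte(b):
--     c = chr(b)
--     if c.isalnum() or c == '-':
--         return c
--     return "\\%03d" % b
--
--
-- def dname_to_str(wire):
--     if not wire:
--         return ""
--     root = len(wire) == 1
--     parts = []
--     rest = wire
--     while rest:
--         llen = rest[0]
--         if parts or root:
--             parts.append('.')
--         label = rest[1:1 + max(llen, 0)]
--         rest = rest[1 + len(label):]
--         for b in label:
--             parts.append(_encode_byte(b))
--     return "".join(parts)
-- ===== Notes on version B (the rewrite author's own statement) =====
-- stated objective: alternative
-- what changed: A is a single flat pass over every byte with a label_len state counter deciding per byte whether it is a length byte or content; B is a two-level loop over labels: it reads the length byte, slices off the whole label at once, encodes its bytes, and advances past it, collecting pieces in a list joined at the end.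
-- outside the precondition, e.g. on dname_to_str([1, 955]): A returns 'λ', B returns 'λ'; on dname_to_str([-1, 65]): A returns 'A', B returns ''
import Mathlib
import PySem

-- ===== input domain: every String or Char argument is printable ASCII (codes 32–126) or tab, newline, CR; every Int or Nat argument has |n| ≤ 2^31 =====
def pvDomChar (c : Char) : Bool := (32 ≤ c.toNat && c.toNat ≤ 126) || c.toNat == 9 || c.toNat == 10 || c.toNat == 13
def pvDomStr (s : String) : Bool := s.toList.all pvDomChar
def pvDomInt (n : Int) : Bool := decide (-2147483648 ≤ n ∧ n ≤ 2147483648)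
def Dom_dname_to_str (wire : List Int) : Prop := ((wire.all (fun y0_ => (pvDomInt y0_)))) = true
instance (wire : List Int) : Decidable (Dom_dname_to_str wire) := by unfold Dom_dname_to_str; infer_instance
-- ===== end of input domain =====

-- B replaces A's flat byte-pass with a label_len state counter by a two-level loop that
-- slices off one whole label at a time and joins the collected pieces (alternative decomposition).


-- ===== PORT A =====
-- chr(b).isalnum(): exact for 0 ≤ b ≤ 255 (Pre_): ASCII digits/letters plus the Latin-1
-- alphanumerics 170,178,179,181,185,186,188,189,190 and 192..255 except 215,247.
def pvIsAlnumA (b : Int) : Bool :=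
  decide ((48 ≤ b ∧ b ≤ 57) ∨ (65 ≤ b ∧ b ≤ 90) ∨ (97 ≤ b ∧ b ≤ 122) ∨
          (192 ≤ b ∧ b ≤ 255 ∧ b ≠ 215 ∧ b ≠ 247)) ||
  ([170, 178, 179, 181, 185, 186, 188, 189, 190] : List Int).contains b

-- chr(wire[i]) then `c.isalnum() or c == '-'` / f"\{wire[i]:03}" = str zero-padded to width 3
def pvChrA (b : Int) : String :=
  let c := Char.ofNat b.toNat
  if pvIsAlnumA b || c == '-' then c.toString
  else "\\" ++ PySem.Str.zfill (PySem.Int.toStr b) 3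

-- one iteration of A's for-loop: state (res, label_len), current byte b
def pvStepA (dname_len : Int) (st : String × Int) (b : Int) : String × Int :=
  if st.2 = 0 then
    (if 0 < PySem.Str.len st.1 ∨ dname_len = 1 then st.1 ++ "." else st.1, b)
  else
    (st.1 ++ pvChrA b, st.2 - 1)

def dname_to_str (wire : List Int) : String :=
  let res : String := ""
  let dname_len : Int := PySem.List.len wire
  if dname_len = 0 then res
  else
    ((PySem.List.pyRange 0 dname_len 1).foldl
      (fun st i => pvStepA dname_len st (PySem.List.pyGetD wire i 0)) (res, (0 : Int))).1

-- ===== PORT B =====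
-- Source B's _encode_byte: c = chr(b); c if c.isalnum() or c == '-' else "\%03d" % b
-- (same Latin-1 isalnum table, exact for 0 ≤ b ≤ 255)
def pvIsAlnumB (b : Int) : Bool :=
  decide ((48 ≤ b ∧ b ≤ 57) ∨ (65 ≤ b ∧ b ≤ 90) ∨ (97 ≤ b ∧ b ≤ 122) ∨
          (192 ≤ b ∧ b ≤ 255 ∧ b ≠ 215 ∧ b ≠ 247)) ||
  ([170, 178, 179, 181, 185, 186, 188, 189, 190] : List Int).contains b

def pvEncB (b : Int) : String :=
  let c := Char.ofNat b.toNat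
  if pvIsAlnumB b || c == '-' then c.toString
  else "\\" ++ PySem.Str.zfill (PySem.Int.toStr b) 3

-- B's while-loop over the remaining wire: slice one label off per iteration
def pvAltLoop (root : Bool) (rest : List Int) (parts : List String) : List String :=
  match rest with
  | [] => parts
  | llen :: rest' =>
    let parts1 := if parts ≠ [] ∨ root = true then parts ++ ["."] else parts
    let label := PySem.List.slice (llen :: rest') (some 1) (some (1 + max llen 0))
    let parts2 := label.foldl (fun acc b => acc ++ [pvEncB b]) parts1
    -- rest = rest[1+len(label):] : nonnegative start, exact as drop
    pvAltLoop root (List.drop (1 + label.length) (llen :: rest')) parts2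
termination_by rest.length
decreasing_by simp

def dname_to_str_alt (wire : List Int) : String :=
  if wire = [] then "" else
  PySem.Str.join "" (pvAltLoop (wire.length == 1) wire [])

-- ===== PRECONDITION & SPEC =====
-- Pre_ restricts the wire to its natural domain, lists of bytes 0..255: beyond that a content
-- byte ≥ 0x110000 or negative makes A's chr() raise ValueError, a negative length byte leaves A's
-- counter negative forever (a leftover-state artefact of the flat pass, which B's label slicing
-- does not reproduce), and on content bytes 256..0x10FFFF both programs agree but the decision
-- runs through Python's full Unicode isalnum table, which cannot feasibly be ported to Lean.
def Pre_dname_to_str (wire : List Int) : Prop := ∀ b ∈ wire, 0 ≤ b ∧ b ≤ 255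
instance (wire : List Int) : Decidable (Pre_dname_to_str wire) := by unfold Pre_dname_to_str; infer_instance
def pvWitness_dname_to_str : List Int := [3, 97, 98, 99, 0]

def Spec_dname_to_str (wire : List Int) (out : String) : Prop := out = dname_to_str_alt wire
instance (wire : List Int) (out : String) : Decidable (Spec_dname_to_str wire out) := by unfold Spec_dname_to_str; infer_instance

-- ===== CLAIM (what is proved, stated in full; the proofs are below) =====
def Claim_equal_dname_to_str : Prop := ∀ (wire : List Int), Dom_dname_to_str wire → Pre_dname_to_str wire → Spec_dname_to_str wire (dname_to_str wire)

-- ===== LEMMAS AND PROOFS =====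

theorem pv_len_nonneg (s : String) : 0 ≤ PySem.Str.len s := by
  simp [PySem.Str.len_eq]

theorem pv_flat_int (a : List Char) (l : List (List Char)) :
    (List.intersperse [] (a :: l)).flatten = a ++ (List.intersperse [] l).flatten := by
  cases l <;> simp [List.intersperse]

theorem pv_join_cons (s : String) (l : List String) :
    PySem.Str.join "" (s :: l) = s ++ PySem.Str.join "" l := by
  rw [← String.toList_inj]
  simp [PySem.Str.toList_join, PySem.Chars.join, List.intercalate, pv_flat_int, String.toList_append]

theorem pv_join_nil : PySem.Str.join "" ([] : List String) = "" := by
  rw [← String.toList_inj]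
  simp [PySem.Str.toList_join, PySem.Chars.join, List.intercalate]

theorem pv_join_append (p q : List String) :
    PySem.Str.join "" (p ++ q) = PySem.Str.join "" p ++ PySem.Str.join "" q := by
  induction p with
  | nil => simp [pv_join_nil]
  | cons s t ih => simp only [List.cons_append, pv_join_cons, ih, String.append_assoc]

theorem pv_encB_len_pos (b : Int) : 0 < PySem.Str.len (pvEncB b) := by
  by_cases h : (pvIsAlnumB b || Char.ofNat b.toNat == '-') = true
  · simp [pvEncB, h, PySem.Str.len_eq]
  · rw [show pvEncB b = "\\" ++ PySem.Str.zfill (PySem.Int.toStr b) 3 by simp [pvEncB, h]]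
    rw [PySem.Str.len_append]
    have h2 : 0 ≤ PySem.Str.len (PySem.Str.zfill (PySem.Int.toStr b) 3) := by simp [PySem.Str.len_eq]
    have h1 : PySem.Str.len "\\" = 1 := rfl
    omega

theorem pv_chrA_eq_encB (b : Int) : pvChrA b = pvEncB b := rfl

theorem pv_foldl_enc (lab : List Int) (res : String) :
    lab.foldl (fun r b => r ++ pvEncB b) res = res ++ PySem.Str.join "" (lab.map pvEncB) := by
  induction lab generalizing res with
  | nil => simp [pv_join_nil]
  | cons b t ih => simp only [List.foldl_cons, List.map_cons, pv_join_cons, ih, String.append_assoc]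

theorem pv_contentLe (L : Int) (lab : List Int) (res : String) (k : Int)
    (hk : (lab.length : Int) ≤ k) :
    lab.foldl (pvStepA L) (res, k) =
      (lab.foldl (fun r b => r ++ pvEncB b) res, k - lab.length) := by
  induction lab generalizing res k with
  | nil => simp
  | cons b t ih =>
    have hk0 : k ≠ 0 := by simp at hk; omega
    simp only [List.foldl_cons, pvStepA, if_neg hk0]
    rw [pv_chrA_eq_encB b, ih _ _ (by simp at hk ⊢; omega)]
    simp at hk ⊢
    omega

theorem pv_main (L : Int) (root : Bool) (hroot : root = true ↔ L = 1) :
    ∀ (fuel : Nat) (rest : List Int) (parts : List String) (res : String),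
      rest.length ≤ fuel →
      (∀ b ∈ rest, 0 ≤ b ∧ b ≤ 255) →
      PySem.Str.join "" parts = res →
      (parts = [] ↔ PySem.Str.len res = 0) →
      (rest.foldl (pvStepA L) (res, 0)).1 = PySem.Str.join "" (pvAltLoop root rest parts) := by
  intro fuel
  induction fuel with
  | zero =>
    intro rest parts res hf _ hj _
    have h0 : rest = [] := List.eq_nil_of_length_eq_zero (Nat.le_zero.mp hf)
    subst h0
    simpa [pvAltLoop] using hj.symm
  | succ n ih =>
    intro rest parts res hf hg hj hinv
    match rest with
    | [] => simpa [pvAltLoop] using hj.symm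
    | llen :: rest' =>
      have hb := hg llen (List.mem_cons_self)
      have hgr : ∀ b ∈ rest', 0 ≤ b ∧ b ≤ 255 :=
        fun b hx => hg b (List.mem_cons_of_mem _ hx)
      -- the dot conditions agree
      have hcond : (0 < PySem.Str.len res ∨ L = 1) ↔ (parts ≠ [] ∨ root = true) := by
        have hnn := pv_len_nonneg res
        constructor
        · rintro (h | h)
          · exact Or.inl (fun he => by rw [hinv.mp he] at h; omega)
          · exact Or.inr (hroot.mpr h)
        · rintro (h | h)
          · refine Or.inl ?_
            have : PySem.Str.len res ≠ 0 := fun he => h (hinv.mpr he)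
            omega
          · exact Or.inr (hroot.mp h)
      -- names for the one-step results
      set res1 := (if 0 < PySem.Str.len res ∨ L = 1 then res ++ "." else res) with hres1
      set parts1 := (if parts ≠ [] ∨ root = true then parts ++ ["."] else parts) with hparts1
      have hj1 : PySem.Str.join "" parts1 = res1 := by
        rw [hparts1, hres1]
        by_cases hc : parts ≠ [] ∨ root = true
        · rw [if_pos hc, if_pos (hcond.mpr hc), pv_join_append, hj, pv_join_cons, pv_join_nil]
          simp
        · rw [if_neg hc, if_neg (fun h => hc (hcond.mp h)), hj]
      have hinv1 : parts1 = [] ↔ PySem.Str.len res1 = 0 := by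
        rw [hparts1, hres1]
        by_cases hc : parts ≠ [] ∨ root = true
        · rw [if_pos hc, if_pos (hcond.mpr hc)]
          simp only [PySem.Str.len_append]
          have h1 : PySem.Str.len "." = 1 := rfl
          have hnn := pv_len_nonneg res
          constructor
          · intro h; exact absurd h (by simp)
          · intro h; omega
        · rw [if_neg hc, if_neg (fun h => hc (hcond.mp h))]; exact hinv
      -- the label slice
      have hslice : PySem.List.slice (llen :: rest') (some 1) (some (1 + max llen 0)) =
          rest'.take llen.toNat := by
        rw [PySem.List.slice_toNat _ (by omega) (by omega)]
        have hmx : max llen 0 = llen := max_eq_left hb.1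
        have : (1 + max llen 0).toNat - (1 : Int).toNat = llen.toNat := by rw [hmx]; omega
        rw [this]
        simp
      set label := rest'.take llen.toNat with hlabel
      set t := min llen.toNat rest'.length with ht
      have hlen : label.length = t := List.length_take
      have hsplit : label ++ rest'.drop t = rest' := by
        by_cases hge : llen.toNat ≤ rest'.length
        · rw [ht, min_eq_left hge, hlabel]; exact List.take_append_drop _ _
        · rw [ht, min_eq_right (by omega), hlabel, List.take_of_length_le (by omega),
            List.drop_length, List.append_nil]
      -- A side: one step, then the label is consumed as content
      have hA : (List.foldl (pvStepA L) (res, 0) (llen :: rest')) =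
          List.foldl (pvStepA L) (res1 ++ PySem.Str.join "" (label.map pvEncB), llen - t)
            (rest'.drop t) := by
        rw [List.foldl_cons]
        have hstep : pvStepA L (res, 0) llen = (res1, llen) := by
          simp [pvStepA, hres1]
        rw [hstep]
        conv_lhs => rw [← hsplit]
        rw [List.foldl_append,
          pv_contentLe L label res1 llen (by rw [hlen]; omega),
          pv_foldl_enc, hlen]
      -- B side: one step of the loop
      rw [pvAltLoop]
      simp only [hslice, ← hparts1, PySem.List.foldl_append_singleton_eq_map, hlen]
      have hdrop : List.drop (1 + t) (llen :: rest') = rest'.drop t := by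
        have : 1 + t = t + 1 := by omega
        rw [this, List.drop_succ_cons]
      rw [hdrop, hA]
      -- invariants for the recursive call / base case
      set res2 := res1 ++ PySem.Str.join "" (label.map pvEncB) with hres2
      set parts2 := parts1 ++ label.map pvEncB with hparts2
      have hj2 : PySem.Str.join "" parts2 = res2 := by
        rw [hparts2, hres2, pv_join_append, hj1]
      have hinv2 : parts2 = [] ↔ PySem.Str.len res2 = 0 := by
        rw [hparts2, hres2]
        have hnn1 := pv_len_nonneg res1
        have hnn2 := pv_len_nonneg (PySem.Str.join "" (label.map pvEncB))
        constructor
        · intro h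
          rcases List.append_eq_nil_iff.mp h with ⟨h1, h2⟩
          rw [PySem.Str.len_append, hinv1.mp h1, List.map_eq_nil_iff.mp h2]
          simp [pv_join_nil]
        · intro h
          rw [PySem.Str.len_append] at h
          have hl0 : label = [] := by
            rcases label with _ | ⟨b, lab'⟩
            · rfl
            · exfalso
              have := pv_encB_len_pos b
              have hnn3 := pv_len_nonneg (PySem.Str.join "" (lab'.map pvEncB))
              rw [List.map_cons, pv_join_cons, PySem.Str.len_append] at h
              omega
          rw [hl0]
          simp only [List.map_nil, List.append_nil]
          exact hinv1.mpr (by rw [hl0] at h; simpa [pv_join_nil] using h)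
      by_cases hge : llen.toNat ≤ rest'.length
      · -- the whole label was present: counter is back to 0, recurse
        have ht0 : llen - t = 0 := by rw [ht, min_eq_left hge]; omega
        rw [ht0]
        exact ih (rest'.drop t) parts2 res2
          (by simp only [List.length_drop]; simp at hf; omega)
          (fun b hx => hgr b (List.mem_of_mem_drop hx)) hj2 hinv2
      · -- truncated wire: nothing left after the label
        have hd0 : rest'.drop t = [] := by
          rw [ht, min_eq_right (by omega)]; exact List.drop_length
        rw [hd0]
        simpa [pvAltLoop] using hj2.symm

theorem pv_A_nonempty (wire : List Int) (h : wire ≠ []) :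
    dname_to_str wire = (wire.foldl (pvStepA (wire.length : Int)) ("", 0)).1 := by
  unfold dname_to_str
  simp only [PySem.List.len_eq]
  rw [if_neg (by simpa using h),
    PySem.List.foldl_pyRange_zero_pyGetD' wire 0 (pvStepA (wire.length : Int)) ("", (0:Int))]

-- ===== VERDICT (by name: the statement is the Claim_ definition above) =====
theorem dname_to_str_spec : Claim_equal_dname_to_str := by
  intro wire _ hpre
  unfold Spec_dname_to_str
  by_cases hw : wire = []
  · subst hw; rfl
  · rw [pv_A_nonempty wire hw]
    unfold dname_to_str_alt
    rw [if_neg hw]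
    exact pv_main (wire.length : Int) (wire.length == 1) (by simp)
      wire.length wire [] "" le_rfl hpre pv_join_nil (by simp [PySem.Str.len_eq])
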